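-- pv_equiv track=rewrite | github.com/Minerstove/Python | Lab4/lab4d.py | draw_bomb_traces
-- ===== SOURCE A (Python) =====
-- def draw_bomb_traces(bombs, p, koyuki, n):
--     rc = 2 * n + 1
--     ky, kx = koyuki
--
--     # make empty grid
--     grid = []
--     for _ in range(rc):
--         row = list("." * rc)
--         grid.append(row)
--
--     # draw one diamond ring of radius p around each bomb
--     for bi, bj in bombs:
--         for dx in range(-p, p + 1):
--             abs_dx = dx if dx >= 0 else -dx
--             gap = p - abs_dx
--             for dy in range(-gap, gap + 1):
--                 if abs_dx + (dy if dy >= 0 else -dy) == p: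
--                     y = bi + dy
--                     x = bj + dx
--                     sy = n + (y - ky)
--                     sx = n + (x - kx)
--                     if 0 <= sy < rc and 0 <= sx < rc:
--                         grid[sy][sx] = "X"
--
--     # build final string (no comprehensions)
--     lines = []
--     for row in grid:
--         line = ""
--         for ch in row:
--             line = line + ch
--         lines.append(line)
--
--     result = ""
--     for i in range(len(lines)):
--         result = result + lines[i]
--         if i != len(lines) - 1:
--             result = result + "\n"
--     result = result + "\n"
--
--     return result
-- ===== SOURCE B (Python) =====
-- def draw_bomb_traces(bombs, p, koyuki, n):
--     rc = 2 * n + 1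
--     ky, kx = koyuki
--     # collect the ring points directly: for each dx only dy = +/-(p-|dx|)
--     marks = set()
--     for bi, bj in bombs:
--         for dx in range(-p, p + 1):
--             gap = p - abs(dx)
--             for dy in (gap, -gap):
--                 sy = n + (bi + dy - ky)
--                 sx = n + (bj + dx - kx)
--                 if 0 <= sy < rc and 0 <= sx < rc:
--                     marks.add((sy, sx))
--     rows = []
--     for sy in range(rc):
--         rows.append("".join("X" if (sy, sx) in marks else "." for sx in range(rc)))
--     return "\n".join(rows) + "\n"
-- ===== Notes on version B (the rewrite author's own statement) =====
-- stated objective: alternative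
-- what changed: Instead of mutating a pre-built character grid and scanning the full dy range per dx to test |dx|+|dy|==p, B collects only the two ring points dy=+/-(p-|dx|) per dx into a set and renders each row by set membership; intended as faster (O(B*p) vs O(B*p^2) ring work, measured 5-18x on mid sizes) but the shared O(rc^2) rendering dominates at the largest timed size, so no speed is claimed.
import Mathlib
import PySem

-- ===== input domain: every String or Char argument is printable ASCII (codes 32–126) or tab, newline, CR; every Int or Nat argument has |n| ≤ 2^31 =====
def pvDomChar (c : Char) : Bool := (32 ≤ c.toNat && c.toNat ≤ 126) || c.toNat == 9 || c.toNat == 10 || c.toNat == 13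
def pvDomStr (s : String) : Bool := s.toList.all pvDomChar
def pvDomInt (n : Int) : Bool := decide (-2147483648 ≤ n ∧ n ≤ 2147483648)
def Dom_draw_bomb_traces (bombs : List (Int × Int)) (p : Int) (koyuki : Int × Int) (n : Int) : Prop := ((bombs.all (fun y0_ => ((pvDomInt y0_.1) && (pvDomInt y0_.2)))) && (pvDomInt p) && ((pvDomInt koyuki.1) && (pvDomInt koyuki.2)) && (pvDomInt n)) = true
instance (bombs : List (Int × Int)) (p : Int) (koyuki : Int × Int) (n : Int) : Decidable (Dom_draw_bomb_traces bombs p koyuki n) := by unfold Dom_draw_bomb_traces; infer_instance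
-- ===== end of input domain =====

-- B replaces A's per-bomb quadratic scan (all dy for each dx, testing |dx|+|dy|=p) by plotting only
-- the two ring points dy = ±(p-|dx|) per dx into a set, then renders rows by membership.

-- ===== PORT A =====
-- grid cells are Chars; strings are built on List Char (PySem convention) and wrapped with String.ofList at the end
def draw_bomb_traces (bombs : List (Int × Int)) (p : Int) (koyuki : Int × Int) (n : Int) : String :=
  let rc : Int := 2 * n + 1
  let ky := koyuki.1
  let kx := koyuki.2
  -- make empty grid
  let grid : List (List Char) :=
    (PySem.List.pyRange 0 rc 1).foldl (fun g _ => g ++ [PySem.List.pyRepeat ['.'] rc]) []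
  -- draw one diamond ring of radius p around each bomb
  let grid : List (List Char) :=
    bombs.foldl (fun g b =>
      (PySem.List.pyRange (-p) (p + 1) 1).foldl (fun g dx =>
        let abs_dx := if dx ≥ 0 then dx else -dx
        let gap := p - abs_dx
        (PySem.List.pyRange (-gap) (gap + 1) 1).foldl (fun g dy =>
          if abs_dx + (if dy ≥ 0 then dy else -dy) = p then
            let y := b.1 + dy
            let x := b.2 + dx
            let sy := n + (y - ky)
            let sx := n + (x - kx)
            if 0 ≤ sy ∧ sy < rc ∧ 0 ≤ sx ∧ sx < rc then
              PySem.List.pySetD g sy (PySem.List.pySetD (PySem.List.pyGetD g sy []) sx 'X')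
            else g
          else g) g) g) grid
  -- build final string
  let lines : List (List Char) :=
    grid.foldl (fun ls row => ls ++ [row.foldl (fun line ch => line ++ [ch]) []]) []
  let result : List Char :=
    (PySem.List.pyRange 0 (lines.length : Int) 1).foldl (fun r i =>
      let r := r ++ PySem.List.pyGetD lines i []
      if i ≠ (lines.length : Int) - 1 then r ++ ['\n'] else r) []
  String.ofList (result ++ ['\n'])

-- ===== PORT B =====
def draw_bomb_traces_alt (bombs : List (Int × Int)) (p : Int) (koyuki : Int × Int) (n : Int) : String :=
  let rc : Int := 2 * n + 1
  let marks : PySem.Set (Int × Int) :=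
    bombs.foldl (fun m b =>
      (PySem.List.pyRange (-p) (p + 1) 1).foldl (fun m dx =>
        let gap := p - |dx|
        [gap, -gap].foldl (fun m dy =>
          let sy := n + (b.1 + dy - koyuki.1)
          let sx := n + (b.2 + dx - koyuki.2)
          if 0 ≤ sy ∧ sy < rc ∧ 0 ≤ sx ∧ sx < rc then PySem.Set.add m (sy, sx) else m) m) m)
      PySem.Set.empty
  let rows : List (List Char) :=
    (PySem.List.pyRange 0 rc 1).map (fun sy =>
      (PySem.List.pyRange 0 rc 1).map (fun sx => if (sy, sx) ∈ marks then 'X' else '.'))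
  String.ofList (PySem.Chars.join ['\n'] rows ++ ['\n'])

-- ===== PRECONDITION & SPEC =====
def Spec_draw_bomb_traces (bombs : List (Int × Int)) (p : Int) (koyuki : Int × Int) (n : Int) (out : String) : Prop := out = draw_bomb_traces_alt bombs p koyuki n
instance (bombs : List (Int × Int)) (p : Int) (koyuki : Int × Int) (n : Int) (out : String) : Decidable (Spec_draw_bomb_traces bombs p koyuki n out) := by unfold Spec_draw_bomb_traces; infer_instance

-- ===== CLAIM (what is proved, stated in full; the proofs are below) =====
def Claim_equal_draw_bomb_traces : Prop := ∀ (bombs : List (Int × Int)) (p : Int) (koyuki : Int × Int) (n : Int), Dom_draw_bomb_traces bombs p koyuki n → Spec_draw_bomb_traces bombs p koyuki n (draw_bomb_traces bombs p koyuki n)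

-- ===== LEMMAS AND PROOFS =====

-- grid helpers: cell access with defaults, and the shape invariant of A's grid
def pvCell (g : List (List Char)) (i j : Nat) : Char := (g.getD i []).getD j '.'

def pvShape (R : Nat) (g : List (List Char)) : Prop := g.length = R ∧ ∀ r ∈ g, r.length = R

-- one guarded in-place write of A: shape is preserved and exactly the cell (sy,sx) becomes 'X'
lemma pvStep_shape (rc sy sx : Int) (g : List (List Char)) (h : pvShape rc.toNat g) :
    pvShape rc.toNat (if 0 ≤ sy ∧ sy < rc ∧ 0 ≤ sx ∧ sx < rc then
      PySem.List.pySetD g sy (PySem.List.pySetD (PySem.List.pyGetD g sy []) sx 'X') else g) := by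
  split_ifs with hc
  · obtain ⟨hl, hr⟩ := h
    have hlen : sy.toNat < g.length := by omega
    constructor
    · rw [PySem.List.pySetD_of_nonneg _ _ hc.1, List.length_set, hl]
    · intro r hrmem
      rw [PySem.List.pySetD_of_nonneg _ _ hc.1] at hrmem
      rcases List.mem_or_eq_of_mem_set hrmem with h1 | h1
      · exact hr r h1
      · subst h1
        rw [PySem.List.pySetD_of_nonneg _ _ hc.2.2.1, List.length_set,
          PySem.List.pyGetD_eq_getElem _ _ hc.1 (by omega)]
        exact hr _ (List.getElem_mem hlen)
  · exact h

lemma pvStep_cell (rc sy sx : Int) (g : List (List Char)) (h : pvShape rc.toNat g)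
    (i j : Nat) (hi : i < rc.toNat) (hj : j < rc.toNat) :
    pvCell (if 0 ≤ sy ∧ sy < rc ∧ 0 ≤ sx ∧ sx < rc then
      PySem.List.pySetD g sy (PySem.List.pySetD (PySem.List.pyGetD g sy []) sx 'X') else g) i j
      = if sy = (i : Int) ∧ sx = (j : Int) then 'X' else pvCell g i j := by
  obtain ⟨hl, hr⟩ := h
  split_ifs with hc he he
  · -- guard holds, (sy,sx) = (i,j)
    obtain ⟨h1, h2⟩ := he
    rw [PySem.List.pySetD_of_nonneg _ _ hc.1,
      PySem.List.pySetD_of_nonneg _ _ hc.2.2.1,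
      PySem.List.pyGetD_eq_getElem _ _ hc.1 (by omega)]
    have hsy : sy.toNat = i := by omega
    have hsx : sx.toNat = j := by omega
    have hrow : g[i].length = rc.toNat := hr _ (List.getElem_mem (by omega))
    simp [pvCell, List.getD_eq_getElem?_getD, hsy, hsx, hl, hi, hj, hrow]
  · -- guard holds, different cell: unchanged
    rw [PySem.List.pySetD_of_nonneg _ _ hc.1,
      PySem.List.pySetD_of_nonneg _ _ hc.2.2.1,
      PySem.List.pyGetD_eq_getElem _ _ hc.1 (by omega)]
    by_cases hy : sy.toNat = i
    · have hx : sx.toNat ≠ j := by omega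
      simp [pvCell, List.getD_eq_getElem?_getD, hy, hx, hl, hi]
    · simp [pvCell, List.getD_eq_getElem?_getD, hy]
  · -- guard fails but (sy,sx) = (i,j): impossible since (i,j) is in range
    exact absurd ⟨by omega, by omega, by omega, by omega⟩ hc
  · rfl

-- a fold of shape-and-cell-preserving marking steps marks exactly the union of the steps' cells
lemma pvMark_foldl {α : Type} (R : Nat) (l : List α) (step : List (List Char) → α → List (List Char))
    (P : α → Nat → Nat → Prop)
    (hstep : ∀ g a, a ∈ l → pvShape R g →
      pvShape R (step g a) ∧ ∀ i j, i < R → j < R →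
        (P a i j → pvCell (step g a) i j = 'X') ∧ (¬ P a i j → pvCell (step g a) i j = pvCell g i j)) :
    ∀ g, pvShape R g →
      pvShape R (l.foldl step g) ∧ ∀ i j, i < R → j < R →
        ((∃ a ∈ l, P a i j) → pvCell (l.foldl step g) i j = 'X') ∧
        ((¬ ∃ a ∈ l, P a i j) → pvCell (l.foldl step g) i j = pvCell g i j) := by
  induction l with
  | nil => exact fun g hg => ⟨hg, fun i j hi hj => ⟨by simp, fun _ => rfl⟩⟩
  | cons a l ih =>
    intro g hg
    obtain ⟨hsh, hcell⟩ := hstep g a (by simp) hg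
    have ihres := ih (fun g a ha hg => hstep g a (by simp [ha]) hg) (step g a) hsh
    rw [List.foldl_cons]
    refine ⟨ihres.1, fun i j hi hj => ⟨?_, ?_⟩⟩
    · rintro ⟨a', ha', hP⟩
      rcases List.mem_cons.mp ha' with rfl | hmem
      · by_cases hrest : ∃ x ∈ l, P x i j
        · exact (ihres.2 i j hi hj).1 hrest
        · rw [(ihres.2 i j hi hj).2 hrest]
          exact (hcell i j hi hj).1 hP
      · exact (ihres.2 i j hi hj).1 ⟨a', hmem, hP⟩
    · intro hne
      rw [(ihres.2 i j hi hj).2 (fun ⟨x, hx, hP⟩ => hne ⟨x, by simp [hx], hP⟩)]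
      exact (hcell i j hi hj).2 (fun hP => hne ⟨a, by simp, hP⟩)

-- a fold of guarded set-inserting steps collects exactly the union of the steps' points
lemma pvAdd_foldl {α : Type} (l : List α) (step : PySem.Set (Int × Int) → α → PySem.Set (Int × Int))
    (P : α → Int × Int → Prop)
    (hstep : ∀ m a q, a ∈ l → (q ∈ step m a ↔ P a q ∨ q ∈ m)) :
    ∀ m q, q ∈ l.foldl step m ↔ (∃ a ∈ l, P a q) ∨ q ∈ m := by
  induction l with
  | nil => simp
  | cons a l ih =>
    intro m q
    rw [List.foldl_cons, ih (fun m a q ha => hstep m a q (by simp [ha])) (step m a) q,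
      hstep m a q (by simp)]
    constructor
    · rintro (⟨x, hx, hP⟩ | hP | hm)
      · exact Or.inl ⟨x, by simp [hx], hP⟩
      · exact Or.inl ⟨a, by simp, hP⟩
      · exact Or.inr hm
    · rintro (⟨x, hx, hP⟩ | hm)
      · rcases List.mem_cons.mp hx with rfl | hmem
        · exact Or.inr (Or.inl hP)
        · exact Or.inl ⟨x, hmem, hP⟩
      · exact Or.inr (Or.inr hm)

-- Python's "dx if dx >= 0 else -dx" is |dx|
lemma pvIfAbs (dx : Int) : (if dx ≥ 0 then dx else -dx) = |dx| := by
  split_ifs with h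
  · exact (abs_of_nonneg h).symm
  · exact (abs_of_neg (by omega)).symm

-- the dy scan over [-gap, gap] testing |dx|+|dy| = p hits exactly dy = gap and dy = -gap
lemma pvRing_dy (p dx dy : Int) (hdx : -p ≤ dx ∧ dx < p + 1) :
    (-(p - |dx|) ≤ dy ∧ dy < p - |dx| + 1 ∧ |dx| + |dy| = p) ↔ (dy = p - |dx| ∨ dy = -(p - |dx|)) := by
  have h1 : |dx| ≤ p := abs_le.mpr ⟨by omega, by omega⟩
  have h2 : 0 ≤ |dx| := abs_nonneg dx
  constructor
  · rintro ⟨_, _, h⟩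
    have : |dy| = p - |dx| := by omega
    exact (abs_eq (by omega)).mp this
  · rintro (rfl | rfl)
    · have := abs_of_nonneg (a := p - |dx|) (by omega)
      refine ⟨by omega, by omega, by omega⟩
    · have := abs_neg (p - |dx|)
      have := abs_of_nonneg (a := p - |dx|) (by omega)
      refine ⟨by omega, by omega, by omega⟩

-- the manual line-concatenation loop with its "not last" separator test is join with '\n', over List Char
lemma pvFlat (l : List (List Char)) :
    (PySem.List.pyRange 0 (l.length : Int)).foldl
      (fun r i => (r ++ PySem.List.pyGetD l i []) ++ ['\n']) [] = l.flatMap (· ++ ['\n']) := by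
  rw [PySem.List.foldl_pyRange_zero_pyGetD' l [] (fun acc row => (acc ++ row) ++ ['\n']) []]
  rw [PySem.List.foldl_congr_mem l _ (fun acc row => acc ++ (row ++ ['\n'])) []
    (fun acc x _ => by rw [List.append_assoc])]
  exact PySem.List.foldl_append_eq_flatMap _ l []

lemma pvJoin_concat (l : List (List Char)) (a : List Char) :
    PySem.Chars.join ['\n'] (l ++ [a]) = l.flatMap (· ++ ['\n']) ++ a := by
  induction l with
  | nil => simp [PySem.Chars.join_singleton]
  | cons x xs ih =>
    rw [List.cons_append]
    cases hc : xs ++ [a] with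
    | nil => simp at hc
    | cons y t =>
      rw [PySem.Chars.join_cons_cons, ← hc, ih]
      simp

lemma pvAssemble (l : List (List Char)) :
    (PySem.List.pyRange 0 (l.length : Int)).foldl
      (fun r i =>
        if i ≠ (l.length : Int) - 1 then (r ++ PySem.List.pyGetD l i []) ++ ['\n']
        else r ++ PySem.List.pyGetD l i []) [] = PySem.Chars.join ['\n'] l := by
  rcases l.eq_nil_or_concat with rfl | ⟨l, a, rfl⟩
  · simp [PySem.List.pyRange_one_eq_nil, PySem.Chars.join_nil]
  · simp only [List.concat_eq_append]
    have hL : ((l ++ [a]).length : Int) = (l.length : Int) + 1 := by simp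
    rw [pvJoin_concat, hL, PySem.List.pyRange_one_succ_right (by positivity), List.foldl_append]
    have h1 : (PySem.List.pyRange 0 (l.length : Int)).foldl
        (fun r i =>
          if i ≠ ((l.length : Int) + 1) - 1 then (r ++ PySem.List.pyGetD (l ++ [a]) i []) ++ ['\n']
          else r ++ PySem.List.pyGetD (l ++ [a]) i []) []
        = l.flatMap (· ++ ['\n']) := by
      rw [← pvFlat l]
      refine PySem.List.foldl_congr_mem _ _ _ [] (fun acc x hx => ?_)
      have hx' := PySem.List.mem_pyRange_one.mp hx
      have hget : PySem.List.pyGetD (l ++ [a]) x [] = PySem.List.pyGetD l x [] := by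
        rw [PySem.List.pyGetD_eq_getElem _ _ hx'.1 (by simp; omega),
          PySem.List.pyGetD_eq_getElem _ _ hx'.1 (by omega),
          List.getElem_append_left (by omega)]
      rw [if_pos (by omega), hget]
    rw [h1]
    simp only [List.foldl_cons, List.foldl_nil]
    rw [if_neg (by omega)]
    congr 1
    rw [PySem.List.pyGetD_eq_getElem _ _ (by positivity) (by simp)]
    simp


-- for an on-grid cell (i,j), A's exhaustive dy-scan hit and B's two-point guarded insert coincide
lemma pvBridge (p n ky kx : Int) (b : Int × Int) (i j : Nat)
    (hi : (i : Int) < 2 * n + 1) (hj : (j : Int) < 2 * n + 1) :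
    (∃ dx ∈ PySem.List.pyRange (-p) (p + 1), ∃ dy ∈ PySem.List.pyRange (-(p - |dx|)) (p - |dx| + 1),
        |dx| + |dy| = p ∧ n + (b.1 + dy - ky) = (i : Int) ∧ n + (b.2 + dx - kx) = (j : Int))
    ↔ (∃ dx ∈ PySem.List.pyRange (-p) (p + 1), ∃ dy ∈ [p - |dx|, -(p - |dx|)],
        (0 ≤ n + (b.1 + dy - ky) ∧ n + (b.1 + dy - ky) < 2 * n + 1 ∧
          0 ≤ n + (b.2 + dx - kx) ∧ n + (b.2 + dx - kx) < 2 * n + 1) ∧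
        ((i : Int), (j : Int)) = (n + (b.1 + dy - ky), n + (b.2 + dx - kx))) := by
  constructor
  · rintro ⟨dx, hdx, dy, hdy, hc, h1, h2⟩
    have hdx' := PySem.List.mem_pyRange_one.mp hdx
    have hdy' := PySem.List.mem_pyRange_one.mp hdy
    have := (pvRing_dy p dx dy hdx').mp ⟨hdy'.1, hdy'.2, hc⟩
    exact ⟨dx, hdx, dy, by simpa using this, ⟨by omega, by omega, by omega, by omega⟩,
      by rw [h1, h2]⟩
  · rintro ⟨dx, hdx, dy, hdy, hg, heq⟩
    have hdx' := PySem.List.mem_pyRange_one.mp hdx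
    have h1 : (i : Int) = n + (b.1 + dy - ky) := congrArg Prod.fst heq
    have h2 : (j : Int) = n + (b.2 + dx - kx) := congrArg Prod.snd heq
    have hdy' : dy = p - |dx| ∨ dy = -(p - |dx|) := by simpa using hdy
    obtain ⟨hb1, hb2, hb3⟩ := (pvRing_dy p dx dy hdx').mpr hdy'
    exact ⟨dx, hdx, dy, PySem.List.mem_pyRange_one.mpr ⟨hb1, hb2⟩, hb3, h1.symm, h2.symm⟩

-- ===== VERDICT (by name: the statement is the Claim_ definition above) =====
theorem draw_bomb_traces_spec : Claim_equal_draw_bomb_traces := by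
  intro bombs p koyuki n _
  unfold Spec_draw_bomb_traces draw_bomb_traces draw_bomb_traces_alt
  dsimp only
  simp only [pvIfAbs]
  -- A's per-row character loop is the identity, so "lines" is the grid itself
  rw [PySem.List.foldl_congr_mem _ (fun ls row => ls ++ [List.foldl (fun line ch => line ++ [ch]) [] row])
      (fun ls row => ls ++ [row]) []
      (fun acc x _ => by simp only [PySem.List.foldl_append_singleton_eq_self, List.nil_append]),
    PySem.List.foldl_append_singleton_eq_self, List.nil_append]
  -- A's manual separator loop is join with newline
  rw [pvAssemble]
  congr 2
  -- A's empty grid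
  rw [PySem.List.foldl_append_singleton_eq_map (f := fun _ => PySem.List.pyRepeat ['.'] (2 * n + 1)),
    List.nil_append, PySem.List.pyRepeat_singleton, List.map_const', PySem.List.length_pyRange_one]
  congr 1
  simp only [Int.sub_zero]
  -- shape and content of the empty grid
  have hshape0 : pvShape (2 * n + 1).toNat
      (List.replicate (2 * n + 1).toNat (List.replicate (2 * n + 1).toNat '.')) := by
    refine ⟨by simp, fun r hr => ?_⟩
    rw [List.eq_of_mem_replicate hr]; simp
  have hcell0 : ∀ i j, pvCell
      (List.replicate (2 * n + 1).toNat (List.replicate (2 * n + 1).toNat '.')) i j = '.' := by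
    intro i j
    unfold pvCell
    simp only [List.getD_eq_getElem?_getD, List.getElem?_replicate]
    split_ifs <;> simp
  -- characterize A's grid via the marking-fold lemma, one level per loop
  have hA := pvMark_foldl (2 * n + 1).toNat bombs
      (fun g b => List.foldl (fun g dx => List.foldl (fun g dy =>
          if |dx| + |dy| = p then
            if 0 ≤ n + (b.1 + dy - koyuki.1) ∧ n + (b.1 + dy - koyuki.1) < 2 * n + 1 ∧
               0 ≤ n + (b.2 + dx - koyuki.2) ∧ n + (b.2 + dx - koyuki.2) < 2 * n + 1 then
              PySem.List.pySetD g (n + (b.1 + dy - koyuki.1))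
                (PySem.List.pySetD (PySem.List.pyGetD g (n + (b.1 + dy - koyuki.1)) [])
                  (n + (b.2 + dx - koyuki.2)) 'X')
            else g
          else g) g (PySem.List.pyRange (-(p - |dx|)) (p - |dx| + 1))) g (PySem.List.pyRange (-p) (p + 1)))
      (fun b i j => ∃ dx ∈ PySem.List.pyRange (-p) (p + 1),
        ∃ dy ∈ PySem.List.pyRange (-(p - |dx|)) (p - |dx| + 1),
        |dx| + |dy| = p ∧ n + (b.1 + dy - koyuki.1) = (i : Int) ∧ n + (b.2 + dx - koyuki.2) = (j : Int))
      ?hstepA _ hshape0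
  case hstepA =>
    intro g b _ hg
    refine pvMark_foldl (2 * n + 1).toNat (PySem.List.pyRange (-p) (p + 1)) _ _
      (fun g dx _ hg => ?_) g hg
    refine pvMark_foldl (2 * n + 1).toNat (PySem.List.pyRange (-(p - |dx|)) (p - |dx| + 1)) _ _
      (fun g dy _ hg => ?_) g hg
    by_cases hcond : |dx| + |dy| = p
    · rw [if_pos hcond]
      refine ⟨pvStep_shape _ _ _ _ hg, fun i j hi hj => ?_⟩
      rw [pvStep_cell _ _ _ _ hg i j hi hj]
      constructor
      · rintro ⟨-, h1, h2⟩; rw [if_pos ⟨h1, h2⟩]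
      · intro hP; rw [if_neg (fun he => hP ⟨hcond, he.1, he.2⟩)]
    · rw [if_neg hcond]
      exact ⟨hg, fun i j hi hj => ⟨fun hP => absurd hP.1 hcond, fun _ => rfl⟩⟩
  obtain ⟨hshapeA, hcellA⟩ := hA
  -- characterize B's mark set via the set-fold lemma, one level per loop
  have hmem := pvAdd_foldl bombs
      (fun m b => List.foldl (fun m dx => List.foldl (fun m dy =>
          if 0 ≤ n + (b.1 + dy - koyuki.1) ∧ n + (b.1 + dy - koyuki.1) < 2 * n + 1 ∧
             0 ≤ n + (b.2 + dx - koyuki.2) ∧ n + (b.2 + dx - koyuki.2) < 2 * n + 1 then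
            m.add (n + (b.1 + dy - koyuki.1), n + (b.2 + dx - koyuki.2)) else m)
          m [p - |dx|, -(p - |dx|)]) m (PySem.List.pyRange (-p) (p + 1)))
      (fun b q => ∃ dx ∈ PySem.List.pyRange (-p) (p + 1), ∃ dy ∈ [p - |dx|, -(p - |dx|)],
        (0 ≤ n + (b.1 + dy - koyuki.1) ∧ n + (b.1 + dy - koyuki.1) < 2 * n + 1 ∧
          0 ≤ n + (b.2 + dx - koyuki.2) ∧ n + (b.2 + dx - koyuki.2) < 2 * n + 1) ∧
        q = (n + (b.1 + dy - koyuki.1), n + (b.2 + dx - koyuki.2)))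
      ?hstepB PySem.Set.empty
  case hstepB =>
    intro m b q _
    beta_reduce
    refine pvAdd_foldl (PySem.List.pyRange (-p) (p + 1))
      (fun m dx => List.foldl (fun m dy =>
          if 0 ≤ n + (b.1 + dy - koyuki.1) ∧ n + (b.1 + dy - koyuki.1) < 2 * n + 1 ∧
             0 ≤ n + (b.2 + dx - koyuki.2) ∧ n + (b.2 + dx - koyuki.2) < 2 * n + 1 then
            m.add (n + (b.1 + dy - koyuki.1), n + (b.2 + dx - koyuki.2)) else m)
          m [p - |dx|, -(p - |dx|)])
      (fun dx q => ∃ dy ∈ [p - |dx|, -(p - |dx|)],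
        (0 ≤ n + (b.1 + dy - koyuki.1) ∧ n + (b.1 + dy - koyuki.1) < 2 * n + 1 ∧
          0 ≤ n + (b.2 + dx - koyuki.2) ∧ n + (b.2 + dx - koyuki.2) < 2 * n + 1) ∧
        q = (n + (b.1 + dy - koyuki.1), n + (b.2 + dx - koyuki.2)))
      (fun m dx q _ => ?_) m q
    refine pvAdd_foldl [p - |dx|, -(p - |dx|)]
      (fun m dy =>
          if 0 ≤ n + (b.1 + dy - koyuki.1) ∧ n + (b.1 + dy - koyuki.1) < 2 * n + 1 ∧
             0 ≤ n + (b.2 + dx - koyuki.2) ∧ n + (b.2 + dx - koyuki.2) < 2 * n + 1 then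
            m.add (n + (b.1 + dy - koyuki.1), n + (b.2 + dx - koyuki.2)) else m)
      (fun dy q =>
        (0 ≤ n + (b.1 + dy - koyuki.1) ∧ n + (b.1 + dy - koyuki.1) < 2 * n + 1 ∧
          0 ≤ n + (b.2 + dx - koyuki.2) ∧ n + (b.2 + dx - koyuki.2) < 2 * n + 1) ∧
        q = (n + (b.1 + dy - koyuki.1), n + (b.2 + dx - koyuki.2)))
      (fun m dy q _ => ?_) m q
    beta_reduce
    split_ifs with hgd
    · rw [PySem.Set.mem_add]
      constructor
      · rintro (hm | rfl)
        · exact Or.inr hm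
        · exact Or.inl ⟨hgd, rfl⟩
      · rintro (⟨-, rfl⟩ | hm)
        · exact Or.inr rfl
        · exact Or.inl hm
    · constructor
      · exact Or.inr
      · rintro (⟨hg, -⟩ | hm)
        · exact absurd hg hgd
        · exact hm
  have hmem' : ∀ q : Int × Int, q ∈ (List.foldl
      (fun m b => List.foldl (fun m dx => List.foldl (fun m dy =>
          if 0 ≤ n + (b.1 + dy - koyuki.1) ∧ n + (b.1 + dy - koyuki.1) < 2 * n + 1 ∧
             0 ≤ n + (b.2 + dx - koyuki.2) ∧ n + (b.2 + dx - koyuki.2) < 2 * n + 1 then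
            m.add (n + (b.1 + dy - koyuki.1), n + (b.2 + dx - koyuki.2)) else m)
          m [p - |dx|, -(p - |dx|)]) m (PySem.List.pyRange (-p) (p + 1)))
      PySem.Set.empty bombs) ↔ ∃ b ∈ bombs, ∃ dx ∈ PySem.List.pyRange (-p) (p + 1),
        ∃ dy ∈ [p - |dx|, -(p - |dx|)],
        (0 ≤ n + (b.1 + dy - koyuki.1) ∧ n + (b.1 + dy - koyuki.1) < 2 * n + 1 ∧
          0 ≤ n + (b.2 + dx - koyuki.2) ∧ n + (b.2 + dx - koyuki.2) < 2 * n + 1) ∧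
        q = (n + (b.1 + dy - koyuki.1), n + (b.2 + dx - koyuki.2)) := by
    intro q
    rw [hmem q]
    simp [PySem.Set.empty]
  -- the two grids agree cell by cell
  apply List.ext_getElem
  · rw [hshapeA.1]; simp [PySem.List.length_pyRange_one]
  intro i h1 h2
  have hi' : i < (2 * n + 1).toNat := by rw [← hshapeA.1]; exact h1
  apply List.ext_getElem
  · rw [hshapeA.2 _ (List.getElem_mem h1)]
    simp [PySem.List.length_pyRange_one]
  intro j hj1 hj2
  have hj' : j < (2 * n + 1).toNat := by
    rw [hshapeA.2 _ (List.getElem_mem h1)] at hj1; exact hj1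
  have hL : ∀ g : List (List Char), ∀ (hg1 : i < g.length) (hg2 : j < g[i].length),
      g[i][j] = pvCell g i j := by
    intro g hg1 hg2
    unfold pvCell
    rw [show g.getD i [] = g[i] from by
        rw [List.getD_eq_getElem?_getD, List.getElem?_eq_getElem hg1, Option.getD_some],
      List.getD_eq_getElem?_getD, List.getElem?_eq_getElem hg2, Option.getD_some]
  rw [hL _ h1 hj1]
  simp only [List.getElem_map, PySem.List.getElem_pyRange_one, zero_add]
  by_cases hmark : ∃ b ∈ bombs, ∃ dx ∈ PySem.List.pyRange (-p) (p + 1),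
      ∃ dy ∈ PySem.List.pyRange (-(p - |dx|)) (p - |dx| + 1),
      |dx| + |dy| = p ∧ n + (b.1 + dy - koyuki.1) = (i : Int) ∧ n + (b.2 + dx - koyuki.2) = (j : Int)
  · rw [(hcellA i j hi' hj').1 hmark, if_pos]
    rw [hmem' ((i : Int), (j : Int))]
    obtain ⟨b, hb, hrest⟩ := hmark
    exact ⟨b, hb, (pvBridge p n koyuki.1 koyuki.2 b i j (by omega) (by omega)).mp hrest⟩
  · rw [(hcellA i j hi' hj').2 hmark, hcell0, if_neg]
    rw [hmem' ((i : Int), (j : Int))]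
    rintro ⟨b, hb, hrest⟩
    exact hmark ⟨b, hb, (pvBridge p n koyuki.1 koyuki.2 b i j (by omega) (by omega)).mpr hrest⟩
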